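-- pv_equiv track=rewrite | github.com/Abdullahprogramme/Data-Structures-and-Algorithms- | Lab_03_Practice/Quiz_question.py | find_max_sum_coordinates
-- ===== SOURCE A (Python) =====
-- def find_max_sum_coordinates(field):
--     row_index = col_index = sum_row = sum_col = 0
--
--     # Row summing up
--     for i in range(len(field)):
--         total = sum(field[i])
--         if total > sum_row:
--             sum_row = total
--             row_index = i
--
--     # Column summing up
--     for col in range(len(field[0])):
--         total = sum(field[row][col] for row in range(len(field)))
--         if total > sum_col:
--             sum_col = total
--             col_index = col
--
--     return row_index, sum_row, col_index, sum_col
-- ===== SOURCE B (Python) =====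
-- def find_max_sum_coordinates(field):
--     ncols = len(field[0])
--     col_sums = [0] * ncols
--     row_index = sum_row = 0
--     # one fused row-major pass: running row argmax + column-sum accumulator
--     for i, row in enumerate(field):
--         t = sum(row)
--         if t > sum_row:
--             row_index, sum_row = i, t
--         col_sums = [s + x for s, x in zip(col_sums, row)]
--     col_index = sum_col = 0
--     for j, s in enumerate(col_sums):
--         if s > sum_col:
--             col_index, sum_col = j, s
--     return row_index, sum_row, col_index, sum_col
-- ===== Notes on version B (the rewrite author's own statement) =====
-- stated objective: alternative
-- what changed: B replaces A's two independent passes (the second column-major, re-indexing every row per column via a generator) with ONE fused row-major pass that simultaneously maintains the running row argmax and a vector of column sums, followed by a single scan of that vector for the column argmax.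
import Mathlib
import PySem

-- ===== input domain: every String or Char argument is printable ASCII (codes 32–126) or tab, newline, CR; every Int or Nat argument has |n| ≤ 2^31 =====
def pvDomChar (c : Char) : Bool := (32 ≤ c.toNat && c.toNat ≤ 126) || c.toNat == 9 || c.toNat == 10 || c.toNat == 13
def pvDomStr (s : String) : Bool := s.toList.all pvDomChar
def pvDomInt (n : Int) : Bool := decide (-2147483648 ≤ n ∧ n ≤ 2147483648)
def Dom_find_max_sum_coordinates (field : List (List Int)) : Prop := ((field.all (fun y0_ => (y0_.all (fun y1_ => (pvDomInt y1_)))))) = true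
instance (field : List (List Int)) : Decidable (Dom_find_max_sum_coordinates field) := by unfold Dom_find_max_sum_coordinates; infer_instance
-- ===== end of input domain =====

-- B replaces A's two passes (the second column-major, re-indexing all rows per column)
-- with one fused row-major pass maintaining the running row argmax and the column-sum
-- vector together, then a single scan of that vector; objective: alternative.

-- ===== PORT A =====
def find_max_sum_coordinates (field : List (List Int)) : Int × Int × Int × Int :=
  let rowSt := (PySem.List.pyRange 0 (PySem.List.len field) 1).foldl
    (fun (st : Int × Int) i =>
      let total := (PySem.List.pyGetD field i []).sum
      if total > st.2 then (i, total) else st) (0, 0)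
  let colSt := (PySem.List.pyRange 0 (PySem.List.len (PySem.List.pyGetD field 0 [])) 1).foldl
    (fun (st : Int × Int) c =>
      let total := (PySem.List.pyRange 0 (PySem.List.len field) 1).foldl
        (fun (acc : Int) r => acc + PySem.List.pyGetD (PySem.List.pyGetD field r []) c 0) 0
      if total > st.2 then (c, total) else st) (0, 0)
  (rowSt.1, rowSt.2, colSt.1, colSt.2)

-- ===== PORT B =====
def find_max_sum_coordinates_alt (field : List (List Int)) : Int × Int × Int × Int :=
  let ncols := (PySem.List.pyGetD field 0 []).length
  let st := (PySem.List.enumerate field).foldl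
    (fun (st : Int × Int × List Int) p =>
      let t := p.2.sum
      let rowSt := if t > st.2.1 then (p.1, t) else (st.1, st.2.1)
      (rowSt.1, rowSt.2, List.zipWith (· + ·) st.2.2 p.2))
    (0, 0, List.replicate ncols (0 : Int))
  let colSel := (PySem.List.enumerate st.2.2).foldl
    (fun (acc : Int × Int) q => if q.2 > acc.2 then (q.1, q.2) else acc) (0, 0)
  (st.1, st.2.1, colSel.1, colSel.2)

-- ===== PRECONDITION & SPEC =====
-- Pre_ excludes exactly the inputs on which A raises IndexError: the empty field
-- (field[0]) and fields with a row shorter than row 0 (field[row][col]).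
def Pre_find_max_sum_coordinates (field : List (List Int)) : Prop :=
  field ≠ [] ∧ ∀ r ∈ field, (field.getD 0 []).length ≤ r.length
instance (field : List (List Int)) : Decidable (Pre_find_max_sum_coordinates field) := by
  unfold Pre_find_max_sum_coordinates; infer_instance
def pvWitness_find_max_sum_coordinates : List (List Int) := [[1, 2], [3, 4]]

def Spec_find_max_sum_coordinates (field : List (List Int)) (out : Int × Int × Int × Int) : Prop := out = find_max_sum_coordinates_alt field
instance (field : List (List Int)) (out : Int × Int × Int × Int) : Decidable (Spec_find_max_sum_coordinates field out) := by unfold Spec_find_max_sum_coordinates; infer_instance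

-- ===== CLAIM (what is proved, stated in full; the proofs are below) =====
def Claim_equal_find_max_sum_coordinates : Prop := ∀ (field : List (List Int)), Dom_find_max_sum_coordinates field → Pre_find_max_sum_coordinates field → Spec_find_max_sum_coordinates field (find_max_sum_coordinates field)

-- ===== LEMMAS AND PROOFS =====

-- B's fused fold splits into the row-selection fold and the column-sum fold
theorem pv_split (l : List (Int × List Int)) (ri rs : Int) (cs : List Int) :
    l.foldl (fun (st : Int × Int × List Int) p =>
      let t := p.2.sum
      let rowSt := if t > st.2.1 then (p.1, t) else (st.1, st.2.1)
      (rowSt.1, rowSt.2, List.zipWith (· + ·) st.2.2 p.2)) (ri, rs, cs) =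
    (let s := l.foldl (fun (st : Int × Int) p =>
        if p.2.sum > st.2 then (p.1, p.2.sum) else st) (ri, rs)
     (s.1, s.2, (l.map Prod.snd).foldl (fun a r => List.zipWith (· + ·) a r) cs)) := by
  induction l generalizing ri rs cs with
  | nil => rfl
  | cons p rest ih =>
    simp only [List.foldl_cons, List.map_cons]
    by_cases h : p.2.sum > rs <;> simp [h, ih]

-- column-sum accumulation: length is preserved and entry c is the running sum of r.getD c
theorem pv_colfold (rows : List (List Int)) (cs : List Int)
    (h : ∀ r ∈ rows, cs.length ≤ r.length) :
    (rows.foldl (fun a r => List.zipWith (· + ·) a r) cs).length = cs.length ∧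
    ∀ c < cs.length,
      (rows.foldl (fun a r => List.zipWith (· + ·) a r) cs).getD c 0 =
        rows.foldl (fun acc r => acc + r.getD c 0) (cs.getD c 0) := by
  induction rows generalizing cs with
  | nil => exact ⟨rfl, fun c hc => rfl⟩
  | cons r rest ih =>
    have hr : cs.length ≤ r.length := h r (by simp)
    have hlen : (List.zipWith (· + ·) cs r).length = cs.length := by
      simp [List.length_zipWith]; omega
    have hrest : ∀ q ∈ rest, (List.zipWith (· + ·) cs r).length ≤ q.length := by
      intro q hq; rw [hlen]; exact h q (by simp [hq])
    obtain ⟨l1, l2⟩ := ih (List.zipWith (· + ·) cs r) hrest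
    refine ⟨by simpa [hlen] using l1, fun c hc => ?_⟩
    have hcz : c < (List.zipWith (· + ·) cs r).length := by omega
    have hget : (List.zipWith (· + ·) cs r).getD c 0 = cs.getD c 0 + r.getD c 0 := by
      rw [List.getD_eq_getElem _ _ hcz, List.getD_eq_getElem _ _ hc,
        List.getD_eq_getElem _ _ (by omega : c < r.length)]
      simp [List.getElem_zipWith]
    have hfin := l2 c (by omega)
    rw [hget] at hfin
    simpa [List.foldl_cons] using hfin

-- ===== VERDICT (by name: the statement is the Claim_ definition above) =====
theorem find_max_sum_coordinates_spec : Claim_equal_find_max_sum_coordinates := by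
  intro field _ hpre
  obtain ⟨hne, hrows⟩ := hpre
  unfold Spec_find_max_sum_coordinates find_max_sum_coordinates find_max_sum_coordinates_alt
  have hnc' : (PySem.List.pyGetD field 0 []).length = (field.getD 0 []).length := by
    rw [PySem.List.pyGetD_zero]
  have hrows' : ∀ r ∈ field, (PySem.List.pyGetD field 0 []).length ≤ r.length := by
    intro r hr; rw [hnc']; exact hrows r hr
  -- split B's fused pass
  simp only [pv_split, PySem.List.map_snd_enumerate]
  -- row selection equality
  have hrow :
      (PySem.List.enumerate field).foldl
        (fun (st : Int × Int) p => if p.2.sum > st.2 then (p.1, p.2.sum) else st) (0, 0) =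
      (PySem.List.pyRange 0 (PySem.List.len field) 1).foldl
        (fun (st : Int × Int) i =>
          let total := (PySem.List.pyGetD field i []).sum
          if total > st.2 then (i, total) else st) (0, 0) := by
    rw [PySem.List.enumerate_eq_map_pyRange field ([] : List Int), List.foldl_map]
  -- column sums
  obtain ⟨hclen, hcget⟩ := pv_colfold field
    (List.replicate (PySem.List.pyGetD field 0 []).length (0 : Int))
    (by intro r hr; simpa using hrows' r hr)
  -- column selection equality
  have hcol :
      (PySem.List.enumerate (field.foldl (fun cs r => List.zipWith (· + ·) cs r)
          (List.replicate (PySem.List.pyGetD field 0 []).length (0 : Int)))).foldl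
        (fun (st : Int × Int) p => if p.2 > st.2 then (p.1, p.2) else st) (0, 0) =
      (PySem.List.pyRange 0 (PySem.List.len (PySem.List.pyGetD field 0 [])) 1).foldl
        (fun (st : Int × Int) c =>
          let total := (PySem.List.pyRange 0 (PySem.List.len field) 1).foldl
            (fun (acc : Int) r => acc + PySem.List.pyGetD (PySem.List.pyGetD field r []) c 0) 0
          if total > st.2 then (c, total) else st) (0, 0) := by
    rw [PySem.List.enumerate_eq_map_pyRange (field.foldl (fun cs r => List.zipWith (· + ·) cs r)
          (List.replicate (PySem.List.pyGetD field 0 []).length (0 : Int))) 0, List.foldl_map]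
    have h1 : PySem.List.len (field.foldl (fun cs r => List.zipWith (· + ·) cs r)
          (List.replicate (PySem.List.pyGetD field 0 []).length (0 : Int))) =
        PySem.List.len (PySem.List.pyGetD field 0 []) := by
      simpa using hclen
    rw [h1]
    apply PySem.List.foldl_congr_mem
    intro acc j hj
    have hj' : 0 ≤ j ∧ j < ((PySem.List.pyGetD field 0 []).length : Int) := by
      have := (PySem.List.mem_pyRange_one.mp hj)
      constructor; · exact this.1
      · simpa using this.2
    obtain ⟨k, hk⟩ : ∃ k : Nat, j = (k : Int) := ⟨j.toNat, by omega⟩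
    have hkn : k < (PySem.List.pyGetD field 0 []).length := by omega
    have hinner : (PySem.List.pyRange 0 (PySem.List.len field) 1).foldl
        (fun (acc : Int) r => acc + PySem.List.pyGetD (PySem.List.pyGetD field r []) j 0) 0 =
        field.foldl (fun (acc : Int) row => acc + PySem.List.pyGetD row j 0) 0 :=
      PySem.List.foldl_pyRange_zero_pyGetD field []
        (fun (acc : Int) row => acc + PySem.List.pyGetD row j 0) 0
    have hB : PySem.List.pyGetD (field.foldl (fun cs r => List.zipWith (· + ·) cs r)
          (List.replicate (PySem.List.pyGetD field 0 []).length (0 : Int))) j 0 =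
        field.foldl (fun (acc : Int) row => acc + PySem.List.pyGetD row j 0) 0 := by
      subst hk
      rw [PySem.List.pyGetD_natCast]
      have h2 := hcget k (by simpa using hkn)
      rw [h2]
      have h3 : (List.replicate (PySem.List.pyGetD field 0 []).length (0 : Int)).getD k 0 = 0 := by
        simp
      rw [h3]
      apply PySem.List.foldl_congr_mem
      intro acc row _
      rw [PySem.List.pyGetD_natCast]
    simp only [hinner, hB]
  simp only [hrow, hcol]
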